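-- pv_equiv track=rewrite | github.com/Sea-Snell/advent_of_code_2023 | 28/28.py | tilt_right
-- ===== SOURCE A (Python) =====
-- def tilt_right(grid):
--     h, w = len(grid), len(grid[0])
--     curr_col = [w-1 for _ in range(h)]
--     new_grid = [list(row) for row in grid]
--     for col_idx in range(w-1, -1, -1):
--         for row_idx in range(h):
--             if grid[row_idx][col_idx] == 'O':
--                 new_grid[row_idx][col_idx] = '.'
--                 new_grid[row_idx][curr_col[row_idx]] = 'O'
--                 curr_col[row_idx] -= 1
--             elif grid[row_idx][col_idx] == '#':
--                 curr_col[row_idx] = col_idx - 1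
--     return [''.join(row) for row in new_grid]
-- ===== SOURCE B (Python) =====
-- def tilt_right(grid):
--     out = []
--     for row in grid:
--         fixed = []
--         for seg in row.split('#'):
--             k = seg.count('O')
--             moved = seg.replace('O', '.')
--             fixed.append(moved[:len(seg) - k] + 'O' * k)
--         out.append('#'.join(fixed))
--     return out
-- ===== Notes on version B (the rewrite author's own statement) =====
-- stated objective: simpler
-- what changed: Instead of a column-by-column sweep over the whole grid with per-row cursor bookkeeping and in-place cell writes, B rebuilds each row independently: split the row on '#', pack each wall-free segment's k rocks to the right (segment with rocks blanked, truncated, then k 'O's), and rejoin with '#'. Pre_ excludes only inputs where A raises IndexError (empty grid, or a row shorter than the first).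
-- intended difference: On grids having a row longer than the first that contains an 'O' still able to slide within its '#'-free stretch, A tilts only the first len(grid[0]) columns of that row and leaves the rest untouched, while B tilts the whole row; B's is intended since every rock in a row should slide right. — e.g. on tilt_right(["O.", "..OO."]): A returns [".O", "..OO."], B returns [".O", "...OO"]
import Mathlib
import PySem

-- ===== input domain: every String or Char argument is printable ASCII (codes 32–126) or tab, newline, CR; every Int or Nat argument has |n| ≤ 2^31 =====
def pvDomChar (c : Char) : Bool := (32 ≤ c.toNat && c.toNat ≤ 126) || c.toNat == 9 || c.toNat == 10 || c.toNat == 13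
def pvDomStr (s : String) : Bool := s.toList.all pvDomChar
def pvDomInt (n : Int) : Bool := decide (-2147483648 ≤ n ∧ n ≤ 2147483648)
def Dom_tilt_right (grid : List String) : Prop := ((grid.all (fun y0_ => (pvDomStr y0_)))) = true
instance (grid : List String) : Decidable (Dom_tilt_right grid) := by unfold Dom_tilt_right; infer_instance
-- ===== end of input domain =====

-- B rebuilds each row independently (split on '#', pack each segment's rocks to the right, rejoin)
-- instead of A's grid-wide column sweep with per-row cursor bookkeeping; equal wherever A returns,
-- except on ragged grids with a longer slidable row (stated as the intended difference D_ below).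

-- ===== PORT A =====
-- body of A's inner 'for row_idx in range(h)' loop (named so the proofs can speak about it)
def tiltRightInner (g : List (List Char)) (col : Int)
    (st : List Int × List (List Char)) (row : Int) : List Int × List (List Char) :=
  let ch := PySem.List.pyGetD (PySem.List.pyGetD g row []) col ' '  -- grid[row_idx][col_idx]; exact under Pre_
  if ch == 'O' then
    let cc := PySem.List.pyGetD st.1 row 0
    ( PySem.List.pySetD st.1 row (cc - 1),
      PySem.List.pySetD st.2 row
        (PySem.List.pySetD (PySem.List.pySetD (PySem.List.pyGetD st.2 row []) col '.') cc 'O') )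
  else if ch == '#' then
    (PySem.List.pySetD st.1 row (col - 1), st.2)
  else st

def tilt_right (grid : List String) : List String :=
  let g : List (List Char) := grid.map String.toList
  let h : Int := PySem.List.len grid
  let w : Int := PySem.List.len (PySem.List.pyGetD g 0 [])  -- len(grid[0]); exact under Pre_ (grid nonempty)
  let curr0 : List Int := (PySem.List.pyRange 0 h 1).map (fun _ => w - 1)
  let res := (PySem.List.pyRange (w - 1) (-1) (-1)).foldl (fun st col =>
      (PySem.List.pyRange 0 h 1).foldl (tiltRightInner g col) st) (curr0, g)
  res.2.map (fun r => String.ofList r)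

-- ===== PORT B =====
def tilt_right_alt (grid : List String) : List String :=
  grid.map (fun row =>
    let fixed := (PySem.Chars.splitOn row.toList ['#']).map (fun seg =>
      let k := seg.countP (fun c => c == 'O')                     -- seg.count('O')
      let moved := seg.map (fun c => if c == 'O' then '.' else c) -- seg.replace('O', '.') (single-char replace, exact)
      moved.take (seg.length - k) ++ List.replicate k 'O')        -- moved[:len(seg)-k] + 'O'*k
    String.ofList (PySem.Chars.join ['#'] fixed))                 -- '#'.join(fixed)

-- ===== PRECONDITION & SPEC =====
-- Exactly the inputs where A returns normally: A indexes every row at every column of row 0, so it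
-- raises IndexError on the empty grid and whenever some row is shorter than row 0.
def Pre_tilt_right (grid : List String) : Prop :=
  grid ≠ [] ∧ ∀ r ∈ grid, ((grid.headD "").toList).length ≤ r.toList.length
instance (grid : List String) : Decidable (Pre_tilt_right grid) := by
  unfold Pre_tilt_right; infer_instance
def pvWitness_tilt_right : List String := ["O.#.O", ".O..O#.", "#...O"]

-- On grids with a row longer than the first that contains an 'O' still able to slide within its
-- '#'-free stretch, A tilts only the first len(grid[0]) columns of that row and leaves the rest
-- untouched; B tilts the whole row — the intended behaviour, since every rock should slide right.
def D_tilt_right (grid : List String) : Prop :=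
  ∃ r ∈ grid, (grid.headD "").toList.length < r.toList.length ∧
    ∃ s ∈ PySem.Chars.splitOn r.toList ['#'], (s.dropWhile (· != 'O')).any (· != 'O') = true
instance (grid : List String) : Decidable (D_tilt_right grid) := by
  unfold D_tilt_right; infer_instance

def Spec_tilt_right (grid : List String) (out : List String) : Prop :=
  ¬ D_tilt_right grid → out = tilt_right_alt grid
instance (grid : List String) (out : List String) : Decidable (Spec_tilt_right grid out) := by
  unfold Spec_tilt_right; infer_instance

def pvDiffWitness_tilt_right : List String := ["O.", "..OO."]
def pvDiffWitnessOut_tilt_right : (List String) × (List String) :=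
  ([".O", "..OO."], [".O", "...OO"])

-- ===== CLAIM (what is proved, stated in full; the proofs are below) =====
def Claim_unchanged_tilt_right : Prop := ∀ (grid : List String), Dom_tilt_right grid → Pre_tilt_right grid → Spec_tilt_right grid (tilt_right grid)
def Claim_changed_tilt_right : Prop := Dom_tilt_right (pvDiffWitness_tilt_right) ∧ Pre_tilt_right (pvDiffWitness_tilt_right) ∧ D_tilt_right (pvDiffWitness_tilt_right) ∧ tilt_right (pvDiffWitness_tilt_right) = pvDiffWitnessOut_tilt_right.1 ∧ tilt_right_alt (pvDiffWitness_tilt_right) = pvDiffWitnessOut_tilt_right.2 ∧ pvDiffWitnessOut_tilt_right.1 ≠ pvDiffWitnessOut_tilt_right.2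

-- ===== LEMMAS AND PROOFS =====

-- proof-side scanner: some 'O' (or a pending one: seenO) can still slide before the next '#'
def pvCanSlideAux (seenO : Bool) : List Char → Bool
  | [] => false
  | c :: t => if c = '#' then pvCanSlideAux false t
      else if c = 'O' then pvCanSlideAux true t
      else (seenO || pvCanSlideAux seenO t)

-- per-segment packing, as B computes it
def fillSeg (seg : List Char) : List Char :=
  (seg.map (fun c => if c == 'O' then '.' else c)).take (seg.length - seg.countP (fun c => c == 'O'))
    ++ List.replicate (seg.countP (fun c => c == 'O')) 'O'

-- structural version of s.split('#')
def splitH : List Char → List (List Char)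
  | [] => [[]]
  | c :: t => if c = '#' then [] :: splitH t else
      match splitH t with
      | [] => [[c]]
      | s :: rest => (c :: s) :: rest

def consHead (p : List Char) : List (List Char) → List (List Char)
  | [] => [p]
  | s :: r => (p ++ s) :: r

-- right-to-left state machine: (pending rocks, current open segment mapped, settled part to the right)
def settleAux : List Char → Nat × List Char × List Char
  | [] => (0, [], [])
  | c :: t =>
    let p := settleAux t
    if c = '#' then
      (0, [], '#' :: ((p.2.1.take (p.2.1.length - p.1) ++ List.replicate p.1 'O') ++ p.2.2))
    else if c = 'O' then (p.1 + 1, '.' :: p.2.1, p.2.2)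
    else (p.1, c :: p.2.1, p.2.2)

def settleOut (s : List Char) : List Char :=
  ((settleAux s).2.1.take ((settleAux s).2.1.length - (settleAux s).1)
    ++ List.replicate (settleAux s).1 'O') ++ (settleAux s).2.2

def tailJoin (l : List (List Char)) : List Char :=
  (l.map (fun seg => '#' :: fillSeg seg)).flatten

-- per-row step of A (the effect of processing one column on one row's state)
def stepChar (r : List Char) (col : Int) (s : Int × List Char) : Int × List Char :=
  let ch := PySem.List.pyGetD r col ' '
  if ch == 'O' then (s.1 - 1, PySem.List.pySetD (PySem.List.pySetD s.2 col '.') s.1 'O')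
  else if ch == '#' then (col - 1, s.2)
  else s

lemma splitH_ne_nil (s : List Char) : splitH s ≠ [] := by
  cases s with
  | nil => simp [splitH]
  | cons c t =>
    unfold splitH
    split_ifs
    · simp
    · cases h : splitH t <;> simp

lemma splitOn_go_eq (fuel : Nat) (l cur : List Char) (acc : List (List Char))
    (h : l.length ≤ fuel) :
    PySem.Chars.splitOn.go ['#'] fuel l cur acc = acc.reverse ++ consHead cur.reverse (splitH l) := by
  induction fuel generalizing l cur acc with
  | zero =>
    have : l = [] := by cases l <;> simp_all
    subst this
    simp [PySem.Chars.splitOn.go, splitH, consHead]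
  | succ fuel ih =>
    cases l with
    | nil => simp [PySem.Chars.splitOn.go, splitH, consHead]
    | cons c rest =>
      by_cases hc : c = '#'
      · subst hc
        have hpre : List.isPrefixOf ['#'] ('#' :: rest) = true := by
          simp [List.isPrefixOf]
        rw [show PySem.Chars.splitOn.go ['#'] (fuel + 1) ('#' :: rest) cur acc
              = PySem.Chars.splitOn.go ['#'] fuel (List.drop 1 ('#' :: rest)) [] (cur.reverse :: acc) by
            simp [PySem.Chars.splitOn.go, hpre]]
        rw [ih _ _ _ (by simpa using Nat.le_of_succ_le_succ (by simpa using h))]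
        rcases hs : splitH rest with _ | ⟨s0, r⟩
        · exact absurd hs (splitH_ne_nil rest)
        · simp [splitH, hs, consHead]
      · have hpre : List.isPrefixOf ['#'] (c :: rest) = false := by
          simp [List.isPrefixOf]; intro hcontra; exact hc hcontra.symm
        rw [show PySem.Chars.splitOn.go ['#'] (fuel + 1) (c :: rest) cur acc
              = PySem.Chars.splitOn.go ['#'] fuel rest (c :: cur) acc by
            simp [PySem.Chars.splitOn.go, hpre]]
        rw [ih _ _ _ (by simpa using Nat.le_of_succ_le_succ (by simpa using h))]
        rcases hs : splitH rest with _ | ⟨s0, r⟩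
        · exact absurd hs (splitH_ne_nil rest)
        · simp [splitH, hs, consHead, hc]

lemma splitOn_eq_splitH (s : List Char) : PySem.Chars.splitOn s ['#'] = splitH s := by
  unfold PySem.Chars.splitOn
  rw [splitOn_go_eq _ _ _ _ (by omega)]
  rcases hs : splitH s with _ | ⟨s0, r⟩
  · exact absurd hs (splitH_ne_nil s)
  · simp [consHead]

lemma settleAux_eq (s : List Char) :
    settleAux s = ((splitH s).headI.countP (fun c => c == 'O'),
      (splitH s).headI.map (fun c => if c == 'O' then '.' else c), tailJoin (splitH s).tail) := by
  induction s with
  | nil => simp [settleAux, splitH, tailJoin]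
  | cons c t ih =>
    rcases hs : splitH t with _ | ⟨h0, rest⟩
    · exact absurd hs (splitH_ne_nil t)
    · by_cases hc : c = '#'
      · subst hc
        simp only [settleAux, ih, hs]
        simp [splitH, hs, tailJoin, fillSeg]
      · by_cases ho : c = 'O'
        · subst ho
          simp only [settleAux, ih, hs]
          simp [splitH, hs, tailJoin]
        · simp only [settleAux, ih, hs]
          simp [splitH, hs, tailJoin, hc, ho]

lemma join_cons (x : List Char) (xs : List (List Char)) :
    PySem.Chars.join ['#'] (x :: xs) = x ++ (xs.map (fun y => '#' :: y)).flatten := by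
  induction xs generalizing x with
  | nil => simp [PySem.Chars.join_singleton]
  | cons y ys ih =>
    rw [PySem.Chars.join_cons_cons, ih]
    simp

lemma B_row (s : List Char) :
    PySem.Chars.join ['#'] ((PySem.Chars.splitOn s ['#']).map fillSeg) = settleOut s := by
  rw [splitOn_eq_splitH]
  rcases hs : splitH s with _ | ⟨h0, rest⟩
  · exact absurd hs (splitH_ne_nil s)
  · rw [List.map_cons, join_cons]
    unfold settleOut
    rw [settleAux_eq s, hs]
    simp [tailJoin, fillSeg, List.map_map, Function.comp_def]

-- a row with no slidable rock is a fixed point of B's per-row packing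
lemma fillSeg_nil : fillSeg [] = [] := by simp [fillSeg]

lemma fillSeg_allO (t : List Char) (h : ∀ c ∈ t, c = 'O') : fillSeg t = t := by
  have hk : t.countP (fun c => c == 'O') = t.length := by
    rw [List.countP_eq_length]
    intro c hc
    simp [h c hc]
  unfold fillSeg
  rw [hk]
  simp only [Nat.sub_self, List.take_zero, List.nil_append]
  symm
  rw [List.eq_replicate_iff]
  exact ⟨rfl, h⟩

lemma fillSeg_cons_not_O (c : Char) (t : List Char) (hc : ¬ c = 'O') :
    fillSeg (c :: t) = c :: fillSeg t := by
  have hk : (c :: t).countP (fun c => c == 'O') = t.countP (fun c => c == 'O') := by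
    simp [hc]
  have hle : t.countP (fun c => c == 'O') ≤ t.length := List.countP_le_length
  unfold fillSeg
  rw [hk]
  simp only [List.map_cons, List.length_cons]
  rw [show (if c == 'O' then '.' else c) = c by simp [hc]]
  rw [show t.length + 1 - t.countP (fun c => c == 'O')
        = (t.length - t.countP (fun c => c == 'O')) + 1 by omega]
  simp [List.take_succ_cons]

lemma fill_settled (s : List Char) : ∀ b : Bool, pvCanSlideAux b s = false →
    (splitH s).map fillSeg = splitH s ∧ (b = true → ∀ c ∈ (splitH s).headI, c = 'O') := by
  induction s with
  | nil => intro b _; simp [splitH, fillSeg_nil]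
  | cons c t ih =>
    intro b hb
    by_cases hc : c = '#'
    · subst hc
      have ht : pvCanSlideAux false t = false := by simpa [pvCanSlideAux] using hb
      obtain ⟨hmap, _⟩ := ih false ht
      refine ⟨?_, ?_⟩
      · simp [splitH, fillSeg_nil, hmap]
      · intro _; simp [splitH]
    · rcases hs : splitH t with _ | ⟨s0, rest⟩
      · exact absurd hs (splitH_ne_nil t)
      · by_cases ho : c = 'O'
        · subst ho
          have ht : pvCanSlideAux true t = false := by simpa [pvCanSlideAux] using hb
          obtain ⟨hmap, hall⟩ := ih true ht
          rw [hs] at hmap hall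
          have hs0 : ∀ x ∈ s0, x = 'O' := by simpa using hall rfl
          have hfill : fillSeg ('O' :: s0) = 'O' :: s0 := by
            apply fillSeg_allO
            intro x hx
            rcases List.mem_cons.1 hx with h | h
            · exact h
            · exact hs0 x h
          have hrest : rest.map fillSeg = rest := by
            simpa [List.map_cons] using congrArg List.tail hmap
          refine ⟨?_, ?_⟩
          · simp [splitH, hc, hs, hfill, hrest]
          · intro _ x hx
            simp only [splitH, if_neg hc, hs, List.headI_cons] at hx
            rcases List.mem_cons.1 hx with h | h
            · exact h
            · exact hs0 x h
        · have hb' : (b || pvCanSlideAux b t) = false := by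
            simpa [pvCanSlideAux, hc, ho] using hb
          have hbf : b = false := by
            cases b
            · rfl
            · simp at hb'
          subst hbf
          have ht : pvCanSlideAux false t = false := by simpa using hb'
          obtain ⟨hmap, _⟩ := ih false ht
          rw [hs] at hmap
          have hfill0 : fillSeg s0 = s0 := by
            simpa [List.map_cons] using congrArg List.headI hmap
          have hrest : rest.map fillSeg = rest := by
            simpa [List.map_cons] using congrArg List.tail hmap
          refine ⟨?_, ?_⟩
          · simp [splitH, hc, hs, fillSeg_cons_not_O c s0 ho, hfill0, hrest]
          · intro hbad; cases hbad

lemma join_splitH (s : List Char) : PySem.Chars.join ['#'] (splitH s) = s := by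
  induction s with
  | nil => simp [splitH, PySem.Chars.join_singleton]
  | cons c t ih =>
    rcases hs : splitH t with _ | ⟨s0, rest⟩
    · exact absurd hs (splitH_ne_nil t)
    · rw [hs] at ih
      by_cases hc : c = '#'
      · subst hc
        rw [show splitH ('#' :: t) = [] :: s0 :: rest by simp [splitH, hs]]
        rw [join_cons] at ih ⊢
        simp only [List.map_cons, List.flatten_cons, List.nil_append]
        rw [← ih]
        simp
      · rw [show splitH (c :: t) = (c :: s0) :: rest by simp [splitH, hc, hs]]
        rw [join_cons] at ih ⊢
        rw [← ih]
        simp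

-- a settled row is a fixed point of B's per-row transformation
lemma settled_row (s : List Char) (h : pvCanSlideAux false s = false) :
    PySem.Chars.join ['#'] ((PySem.Chars.splitOn s ['#']).map fillSeg) = s := by
  rw [splitOn_eq_splitH, (fill_settled s false h).1, join_splitH]

-- settledness passes to prefixes
lemma canSlide_take (s : List Char) : ∀ (b : Bool) (w : Nat), pvCanSlideAux b s = false →
    pvCanSlideAux b (s.take w) = false := by
  induction s with
  | nil => intro b w _; simp [List.take_nil, pvCanSlideAux]
  | cons c t ih =>
    intro b w h
    cases w with
    | zero => simp [pvCanSlideAux]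
    | succ w =>
      rw [List.take_succ_cons]
      by_cases hc : c = '#'
      · subst hc
        have := ih false w (by simpa [pvCanSlideAux] using h)
        simpa [pvCanSlideAux] using this
      · by_cases ho : c = 'O'
        · subst ho
          have := ih true w (by simpa [pvCanSlideAux, hc] using h)
          simpa [pvCanSlideAux, hc] using this
        · have h' : (b || pvCanSlideAux b t) = false := by
            simpa [pvCanSlideAux, hc, ho] using h
          have hbf : b = false := by
            cases b
            · rfl
            · simp at h'
          subst hbf
          have := ih false w (by simpa using h')
          simpa [pvCanSlideAux, hc, ho] using this

lemma any_of_dropWhile_any (p q : Char → Bool) (l : List Char)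
    (h : (l.dropWhile p).any q = true) : l.any q = true := by
  rw [List.any_eq_true] at h ⊢
  obtain ⟨x, hx, hq⟩ := h
  exact ⟨x, (List.dropWhile_sublist _).subset hx, hq⟩

-- a row on which the scanner fires has a '#'-free segment with a slidable 'O'
lemma aux_bad (s : List Char) : ∀ b : Bool, pvCanSlideAux b s = true →
    (∃ seg ∈ splitH s, (seg.dropWhile (· != 'O')).any (· != 'O') = true) ∨
    (b = true ∧ (splitH s).headI.any (· != 'O') = true) := by
  induction s with
  | nil => intro b h; simp [pvCanSlideAux] at h
  | cons c t ih =>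
    intro b h
    by_cases hc : c = '#'
    · subst hc
      have ht : pvCanSlideAux false t = true := by simpa [pvCanSlideAux] using h
      rcases ih false ht with ⟨seg, hm, hbad⟩ | ⟨hfb, _⟩
      · exact Or.inl ⟨seg, by simp [splitH, hm], hbad⟩
      · cases hfb
    · rcases hs : splitH t with _ | ⟨s0, rest⟩
      · exact absurd hs (splitH_ne_nil t)
      · by_cases ho : c = 'O'
        · subst ho
          have ht : pvCanSlideAux true t = true := by simpa [pvCanSlideAux, hc] using h
          have hsplit : splitH ('O' :: t) = ('O' :: s0) :: rest := by simp [splitH, hc, hs]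
          have hstep : ∀ l : List Char, l.any (· != 'O') = true →
              (('O' :: l).dropWhile (· != 'O')).any (· != 'O') = true := by
            intro l hx
            rw [show ('O' :: l).dropWhile (· != 'O') = 'O' :: l by simp [List.dropWhile]]
            simp [hx]
          rcases ih true ht with ⟨seg, hm, hbad⟩ | ⟨_, hany⟩
          · rw [hs] at hm
            rcases List.mem_cons.1 hm with rfl | hm'
            · exact Or.inl ⟨'O' :: seg, by simp [hsplit],
                hstep seg (any_of_dropWhile_any _ _ _ hbad)⟩
            · exact Or.inl ⟨seg, by simp [hsplit, hm'], hbad⟩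
          · rw [hs] at hany
            exact Or.inl ⟨'O' :: s0, by simp [hsplit], hstep s0 (by simpa using hany)⟩
        · have hsplit : splitH (c :: t) = (c :: s0) :: rest := by simp [splitH, hc, hs]
          cases b with
          | false =>
            have ht : pvCanSlideAux false t = true := by simpa [pvCanSlideAux, hc, ho] using h
            rcases ih false ht with ⟨seg, hm, hbad⟩ | ⟨hfb, _⟩
            · rw [hs] at hm
              rcases List.mem_cons.1 hm with rfl | hm'
              · refine Or.inl ⟨c :: seg, by simp [hsplit], ?_⟩
                have hcb : (c != 'O') = true := by simp [ho]
                rw [show (c :: seg).dropWhile (· != 'O') = seg.dropWhile (· != 'O') by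
                  simp [List.dropWhile, hcb]]
                exact hbad
              · exact Or.inl ⟨seg, by simp [hsplit, hm'], hbad⟩
            · cases hfb
          | true =>
            refine Or.inr ⟨rfl, ?_⟩
            rw [hsplit]
            simp [ho]

lemma settleAux_k_le (s : List Char) : (settleAux s).1 ≤ (settleAux s).2.1.length := by
  induction s with
  | nil => simp [settleAux]
  | cons c t ih =>
    simp only [settleAux]
    split_ifs <;> simp <;> omega

lemma take_set_last (o : List Char) (m : Nat) (h : m < o.length) (x : Char) :
    (o.take (m + 1)).set m x = o.take m ++ [x] := by
  rw [List.take_add_one, List.getElem?_eq_getElem h,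
    show (some o[m]).toList = [o[m]] from rfl, List.set_append]
  simp [List.length_take, Nat.min_eq_left (Nat.le_of_lt h)]

lemma take_cons_getElem (r : List Char) (c : Nat) (h : c < r.length) :
    r.take (c + 1) = r.take c ++ [r[c]] := by
  rw [List.take_add_one, List.getElem?_eq_getElem h]; rfl

-- the per-row invariant of A's sweep
lemma rowA_inv (r t : List Char) : ∀ (n c : Nat), c + n = r.length →
    (((List.range' c n).reverse.map (fun k : Nat => (k : Int))).foldl
        (fun s col => stepChar (r ++ t) col s) ((r.length : Int) - 1, r ++ t))
      = ((c : Int) + (settleAux (r.drop c)).2.1.length - (settleAux (r.drop c)).1 - 1,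
         r.take c ++ (settleOut (r.drop c) ++ t)) := by
  intro n
  induction n with
  | zero =>
    intro c hc
    have hc' : c = r.length := by omega
    subst hc'
    simp [settleAux, settleOut]
  | succ n ih =>
    intro c hc
    have hclen : c < r.length := by omega
    have hkle := settleAux_k_le (r.drop (c + 1))
    have hstep : ((List.range' c (n + 1)).reverse.map (fun k : Nat => (k : Int)))
        = ((List.range' (c + 1) n).reverse.map (fun k : Nat => (k : Int))) ++ [(c : Int)] := by
      rw [List.range'_succ]; simp
    rw [hstep, List.foldl_append, ih (c + 1) (by omega)]
    have hdrop : r.drop c = r[c] :: r.drop (c + 1) := (List.getElem_cons_drop hclen).symm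
    have htake : r.take (c + 1) = r.take c ++ [r[c]] := take_cons_getElem r c hclen
    have hch : PySem.List.pyGetD (r ++ t) (c : Int) ' ' = r[c] := by
      rw [PySem.List.pyGetD_natCast, List.getD_eq_getElem?_getD,
        List.getElem?_append_left (by omega), List.getElem?_eq_getElem hclen]
      rfl
    set k := (settleAux (r.drop (c + 1))).1 with hkdef
    set o := (settleAux (r.drop (c + 1))).2.1 with hodef
    set d := (settleAux (r.drop (c + 1))).2.2 with hddef
    have hout : settleOut (r.drop (c + 1)) ++ t
        = o.take (o.length - k) ++ (List.replicate k 'O' ++ (d ++ t)) := by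
      simp only [settleOut, ← hkdef, ← hodef, ← hddef]
      simp
    by_cases h1 : r[c] = '#'
    · have hsa : settleAux (r.drop c)
          = (0, [], '#' :: ((o.take (o.length - k) ++ List.replicate k 'O') ++ d)) := by
        rw [hdrop]
        simp [settleAux, ← hkdef, ← hodef, ← hddef, h1]
      simp only [List.foldl_cons, List.foldl_nil, stepChar, hch]
      rw [if_neg (by simp [h1]), if_pos (by simp [h1])]
      refine Prod.ext ?_ ?_
      · simp only [hsa]; simp
      · simp only [hsa, settleOut, htake, h1]
        simp [← hkdef, ← hodef, ← hddef]
    · by_cases h2 : r[c] = 'O'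
      · have hsa : settleAux (r.drop c) = (k + 1, '.' :: o, d) := by
          rw [hdrop]
          simp [settleAux, ← hkdef, ← hodef, ← hddef, h2]
        simp only [List.foldl_cons, List.foldl_nil, stepChar, hch]
        rw [if_pos (by simp [h2])]
        refine Prod.ext ?_ ?_
        · rw [show (settleAux (List.drop c r)).2.1.length = o.length + 1 by rw [hsa]; rfl,
            show (settleAux (List.drop c r)).1 = k + 1 by rw [hsa]]
          push_cast; omega
        · have e2 : settleOut (List.drop c r) ++ t
              = ('.' :: o).take ((o.length + 1) - (k + 1))
                  ++ (List.replicate (k + 1) 'O' ++ (d ++ t)) := by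
            simp only [settleOut, hsa, List.length_cons]
            simp
          rw [e2, hout, htake]
          have l1 : (r.take c).length = c := by
            simp [List.length_take]; omega
          have hcast1 : ((((c + 1 : Nat)) : Int) + (o.length : Int) - (k : Int) - 1)
              = (((c + (o.length - k) : Nat)) : Int) := by push_cast; omega
          dsimp only
          rw [hcast1, PySem.List.pySetD_natCast, PySem.List.pySetD_natCast]
          set m := o.length - k with hmdef
          have s1 : (r.take c ++ ([r[c]] ++ (o.take m ++ (List.replicate k 'O' ++ (d ++ t))))).set c '.'
              = r.take c ++ ('.' :: (o.take m ++ (List.replicate k 'O' ++ (d ++ t)))) := by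
            rw [List.set_append, if_neg (by simp [l1]), l1]
            simp only [Nat.sub_self, List.singleton_append, List.set_cons_zero]
          rw [show ((List.take c r ++ [r[c]]) ++ (List.take m o ++ (List.replicate k 'O' ++ (d ++ t))))
              = (r.take c ++ ([r[c]] ++ (o.take m ++ (List.replicate k 'O' ++ (d ++ t)))))
            by simp only [List.append_assoc], s1]
          have s2 : (r.take c ++ ('.' :: (o.take m ++ (List.replicate k 'O' ++ (d ++ t))))).set (c + m) 'O'
              = r.take c ++ (('.' :: (o.take m ++ (List.replicate k 'O' ++ (d ++ t)))).set m 'O') := by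
            rw [List.set_append, if_neg (by simp [l1]), l1]
            simp only [Nat.add_sub_cancel_left]
          rw [s2]
          have s3 : ('.' :: (o.take m ++ (List.replicate k 'O' ++ (d ++ t)))).set m 'O'
              = ((('.' :: o.take m).set m 'O') ++ (List.replicate k 'O' ++ (d ++ t))) := by
            rw [show ('.' :: (o.take m ++ (List.replicate k 'O' ++ (d ++ t))))
                = ('.' :: o.take m) ++ (List.replicate k 'O' ++ (d ++ t)) by simp]
            rw [List.set_append, if_pos (by simp [List.length_take]; omega)]
          rw [s3]
          have s4 : ('.' :: o.take m).set m 'O' = ('.' :: o).take m ++ ['O'] := by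
            rw [show ('.' :: o.take m) = ('.' :: o).take (m + 1) by rfl]
            exact take_set_last ('.' :: o) m (by simp; omega) 'O'
          rw [s4]
          rw [show o.length + 1 - (k + 1) = m by omega]
          simp [List.replicate_succ]
      · have hsa : settleAux (r.drop c) = (k, r[c] :: o, d) := by
          rw [hdrop]
          simp [settleAux, ← hkdef, ← hodef, ← hddef, if_neg h1, if_neg h2]
        simp only [List.foldl_cons, List.foldl_nil, stepChar, hch]
        rw [if_neg (by simp [h2]), if_neg (by simp [h1])]
        refine Prod.ext ?_ ?_
        · rw [show (settleAux (List.drop c r)).2.1.length = o.length + 1 by rw [hsa]; rfl,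
            show (settleAux (List.drop c r)).1 = k by rw [hsa]]
          push_cast; omega
        · have htk : (r[c] :: o).take ((r[c] :: o).length - k) = r[c] :: o.take (o.length - k) := by
            simp only [List.length_cons]
            rw [show o.length + 1 - k = (o.length - k) + 1 by omega]
            rfl
          have e2 : settleOut (List.drop c r) ++ t
              = ((r[c] :: o).take ((r[c] :: o).length - k)
                  ++ (List.replicate k 'O' ++ (d ++ t))) := by
            simp only [settleOut, hsa]
            simp
          rw [e2, htk, hout, htake]
          simp only [List.append_assoc, List.cons_append, List.nil_append]

lemma tiltRightInner_nat (g : List (List Char)) (col : Int)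
    (st : List Int × List (List Char)) (j : Nat) (hj : j < g.length)
    (h1 : st.1.length = g.length) (h2 : st.2.length = g.length) :
    tiltRightInner g col st (j : Int)
      = (st.1.set j (stepChar (g.getD j []) col (st.1.getD j 0, st.2.getD j [])).1,
         st.2.set j (stepChar (g.getD j []) col (st.1.getD j 0, st.2.getD j [])).2) := by
  have e1 : st.1.getD j 0 = st.1[j]'(by omega) := List.getD_eq_getElem _ _ (by omega)
  have e2 : st.2.getD j [] = st.2[j]'(by omega) := List.getD_eq_getElem _ _ (by omega)
  have s1 : st.1.set j (st.1.getD j 0) = st.1 := by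
    rw [e1]; exact List.set_getElem_self (by omega)
  have s2 : st.2.set j (st.2.getD j []) = st.2 := by
    rw [e2]; exact List.set_getElem_self (by omega)
  unfold tiltRightInner stepChar
  simp only [PySem.List.pyGetD_natCast, PySem.List.pySetD_natCast]
  split_ifs
  · rfl
  · exact Prod.ext rfl s2.symm
  · exact Prod.ext s1.symm s2.symm

def innerFold (g : List (List Char)) (col : Int) (n : Nat)
    (st : List Int × List (List Char)) : List Int × List (List Char) :=
  (List.range n).foldl (fun st (row : Nat) => tiltRightInner g col st (row : Int)) st

def outerFold (g : List (List Char)) (cols : List Int)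
    (st : List Int × List (List Char)) : List Int × List (List Char) :=
  cols.foldl (fun st col => innerFold g col g.length st) st

-- inner loop acts pointwise
lemma inner_fold_spec (g : List (List Char)) (col : Int) (n : Nat) :
    ∀ (curr : List Int) (ng : List (List Char)), curr.length = g.length → ng.length = g.length →
      n ≤ g.length →
      (innerFold g col n (curr, ng)).1.length = g.length ∧
      (innerFold g col n (curr, ng)).2.length = g.length ∧
      ∀ j, j < g.length →
        ((innerFold g col n (curr, ng)).1.getD j 0, (innerFold g col n (curr, ng)).2.getD j [])
          = if j < n then stepChar (g.getD j []) col (curr.getD j 0, ng.getD j [])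
            else (curr.getD j 0, ng.getD j []) := by
  induction n with
  | zero =>
    intro curr ng h1 h2 _
    exact ⟨h1, h2, fun j hj => by simp [innerFold]⟩
  | succ n ih =>
    intro curr ng h1 h2 hle
    have hn : n < g.length := by omega
    obtain ⟨l1, l2, hpt⟩ := ih curr ng h1 h2 (by omega)
    have hstep : innerFold g col (n + 1) (curr, ng)
        = tiltRightInner g col (innerFold g col n (curr, ng)) (n : Int) := by
      simp [innerFold, List.range_succ]
    have hrw := tiltRightInner_nat g col (innerFold g col n (curr, ng)) n hn l1 l2
    have hself := hpt n hn
    rw [hstep, hrw]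
    have hcurrng : ((innerFold g col n (curr, ng)).1.getD n 0,
        (innerFold g col n (curr, ng)).2.getD n []) = (curr.getD n 0, ng.getD n []) := by
      rw [hself]; simp
    refine ⟨by simp [l1], by simp [l2], ?_⟩
    intro j hj
    by_cases hjn : j = n
    · subst hjn
      rw [hcurrng]
      simp only [if_pos (by omega : j < j + 1)]
      have hA : ((innerFold g col j (curr, ng)).1.set j
          (stepChar (g.getD j []) col (curr.getD j 0, ng.getD j [])).1).getD j 0
          = (stepChar (g.getD j []) col (curr.getD j 0, ng.getD j [])).1 := by
        rw [List.getD_eq_getElem _ _ (by simp [List.length_set]; omega)]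
        exact List.getElem_set_self _
      have hB : ((innerFold g col j (curr, ng)).2.set j
          (stepChar (g.getD j []) col (curr.getD j 0, ng.getD j [])).2).getD j []
          = (stepChar (g.getD j []) col (curr.getD j 0, ng.getD j [])).2 := by
        rw [List.getD_eq_getElem _ _ (by simp [List.length_set]; omega)]
        exact List.getElem_set_self _
      rw [hA, hB]
    · have hgj := hpt j hj
      dsimp only
      simp only [List.getD_eq_getElem?_getD]
      rw [List.getElem?_set_ne (show n ≠ j by omega), List.getElem?_set_ne (show n ≠ j by omega)]
      simp only [← List.getD_eq_getElem?_getD]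
      rw [hgj]
      by_cases hlt : j < n
      · simp only [if_pos hlt, if_pos (show j < n + 1 by omega)]
      · simp only [if_neg hlt, if_neg (show ¬ j < n + 1 by omega)]

-- outer loop acts pointwise
lemma outer_fold_spec (g : List (List Char)) (cols : List Int) :
    ∀ (curr : List Int) (ng : List (List Char)), curr.length = g.length → ng.length = g.length →
      (outerFold g cols (curr, ng)).1.length = g.length ∧
      (outerFold g cols (curr, ng)).2.length = g.length ∧
      ∀ j, j < g.length →
        ((outerFold g cols (curr, ng)).1.getD j 0, (outerFold g cols (curr, ng)).2.getD j [])
          = cols.foldl (fun s col => stepChar (g.getD j []) col s) (curr.getD j 0, ng.getD j []) := by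
  induction cols with
  | nil =>
    intro curr ng h1 h2
    exact ⟨h1, h2, fun j hj => rfl⟩
  | cons col cols ih =>
    intro curr ng h1 h2
    obtain ⟨l1, l2, hpt⟩ := inner_fold_spec g col g.length curr ng h1 h2 (le_refl _)
    have hstep : outerFold g (col :: cols) (curr, ng)
        = outerFold g cols (innerFold g col g.length (curr, ng)) := by
      simp [outerFold]
    obtain ⟨m1, m2, hpt2⟩ := ih (innerFold g col g.length (curr, ng)).1
      (innerFold g col g.length (curr, ng)).2 l1 l2
    rw [hstep]
    refine ⟨by simpa using m1, by simpa using m2, ?_⟩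
    intro j hj
    have := hpt2 j hj
    simp only [Prod.mk.eta] at this
    rw [this, hpt j hj, if_pos hj]
    rfl

-- ===== VERDICT (by name: the statements are the Claim_ definitions above) =====
theorem tilt_right_spec : Claim_unchanged_tilt_right := by
  intro grid _ hpre hnd
  rcases hpre with ⟨hne, hall⟩
  obtain ⟨r0, rest, rfl⟩ := List.exists_cons_of_ne_nil hne
  set w := r0.toList.length with hwdef
  have hB : tilt_right_alt (r0 :: rest) = (r0 :: rest).map
      (fun row => String.ofList
        (PySem.Chars.join ['#'] ((PySem.Chars.splitOn row.toList ['#']).map fillSeg))) := rfl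
  rw [hB]
  set g : List (List Char) := (r0 :: rest).map String.toList with hgdef
  have hlen_g : g.length = (r0 :: rest).length := by rw [hgdef]; simp
  have hrow : ∀ j, j < g.length → w ≤ (g.getD j []).length := by
    intro j hj
    have h1 : g.getD j [] = g[j] := List.getD_eq_getElem _ _ hj
    have h2 : g[j] = ((r0 :: rest)[j]'(by omega)).toList := by
      simp only [hgdef]
      rcases j with _ | j <;> simp
    have h3 := hall ((r0 :: rest)[j]'(by omega)) (List.getElem_mem _)
    rw [h1, h2]
    simpa [hwdef] using h3
  have hsettled : ∀ j, j < g.length → w < (g.getD j []).length →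
      pvCanSlideAux false (g.getD j []) = false := by
    intro j hj hlt
    have h1 : g.getD j [] = g[j] := List.getD_eq_getElem _ _ hj
    have h2 : g[j] = ((r0 :: rest)[j]'(by omega)).toList := by
      simp only [hgdef]
      rcases j with _ | j <;> simp
    by_contra hbad
    have htrue : pvCanSlideAux false (g.getD j []) = true :=
      Bool.not_eq_false _ |>.mp hbad
    rcases aux_bad (g.getD j []) false htrue with ⟨seg, hm, hb⟩ | ⟨hfb, _⟩
    · apply hnd
      refine ⟨(r0 :: rest)[j]'(by omega), List.getElem_mem _, ?_, seg, ?_, hb⟩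
      · rw [h1, h2] at hlt
        simpa [hwdef] using hlt
      · rw [splitOn_eq_splitH, ← h2, ← h1]
        exact hm
    · cases hfb
  set cols := PySem.List.pyRange ((w : Int) - 1) (-1) (-1) with hcolsdef
  set curr0 := (PySem.List.pyRange 0 (PySem.List.len (r0 :: rest)) 1).map
      (fun _ => PySem.List.len (PySem.List.pyGetD g 0 []) - 1) with hcurr0def
  have e_w : PySem.List.len (PySem.List.pyGetD g 0 []) = (w : Int) := by
    rw [hgdef]
    simp [PySem.List.pyGetD_zero, hwdef]
  have e_w' : (PySem.List.pyGetD g 0 []).length = w := by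
    rw [hgdef]
    simp [PySem.List.pyGetD_zero, hwdef]
  have e_h : PySem.List.len (r0 :: rest) = ((r0 :: rest).length : Int) := PySem.List.len_eq _
  have hcurr0len : curr0.length = g.length := by
    rw [hcurr0def, e_h, hlen_g]
    simp [PySem.List.pyRange_zero]
  have hcurr0get : ∀ j, j < g.length → curr0.getD j 0 = (w : Int) - 1 := by
    intro j hj
    rw [hcurr0def, e_h, show ((r0 :: rest).length : Int) = ((g.length : Nat) : Int) by
        rw [hlen_g], PySem.List.pyRange_zero_nat, List.map_map]
    rw [List.getD_eq_getElem _ _ (by simpa using hj)]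
    simp [e_w']
  have hA : tilt_right (r0 :: rest) = (outerFold g cols (curr0, g)).2.map String.ofList := by
    unfold tilt_right
    dsimp only
    rw [← hgdef, ← hcurr0def, e_w, ← hcolsdef]
    unfold outerFold
    congr 1
    rw [show (fun st col => (PySem.List.pyRange 0 (PySem.List.len (r0 :: rest)) 1).foldl
          (tiltRightInner g col) st) = (fun st col => innerFold g col g.length st) by
      funext st col
      rw [e_h, show ((r0 :: rest).length : Int) = ((g.length : Nat) : Int) by rw [hlen_g],
        PySem.List.pyRange_zero_nat, List.foldl_map]
      rfl]
  rw [hA]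
  obtain ⟨L1, L2, HPT⟩ := outer_fold_spec g cols curr0 g hcurr0len rfl
  have hrowfold : ∀ j, j < g.length →
      (cols.foldl (fun s col => stepChar (g.getD j []) col s) ((w : Int) - 1, g.getD j [])).2
        = settleOut ((g.getD j []).take w) ++ (g.getD j []).drop w := by
    intro j hj
    have hw : w ≤ (g.getD j []).length := hrow j hj
    have hhead : ((g.getD j []).take w).length = w := by
      simp only [List.length_take]; omega
    have hsplit : (g.getD j []).take w ++ (g.getD j []).drop w = g.getD j [] :=
      List.take_append_drop _ _
    have hcols : cols = ((List.range' 0 w).reverse.map (fun k : Nat => (k : Int))) := by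
      rw [hcolsdef, PySem.List.pyRange_neg_one_eq_reverse,
        show ((-1 : Int) + 1) = 0 by ring, show ((w : Int) - 1 + 1) = (w : Int) by ring,
        PySem.List.pyRange_zero_nat, ← List.map_reverse, List.range_eq_range']
    have hinv := rowA_inv ((g.getD j []).take w) ((g.getD j []).drop w) w 0 (by omega)
    rw [hhead, hsplit] at hinv
    rw [hcols, hinv]
    simp
  refine List.ext_getElem (by simp [L2, hlen_g]) ?_
  intro i h1 h2
  have hi : i < g.length := by rw [hlen_g]; simpa using h2
  have hpt := congrArg Prod.snd (HPT i hi)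
  dsimp only at hpt
  rw [hcurr0get i hi] at hpt
  rw [hrowfold i hi] at hpt
  simp only [List.getElem_map]
  rw [← List.getD_eq_getElem _ ([] : List Char) (by omega), hpt]
  have hgi : g.getD i [] = ((r0 :: rest)[i]'(by omega)).toList := by
    rw [List.getD_eq_getElem _ _ hi]
    simp only [hgdef]
    rcases i with _ | i <;> simp
  set ri := g.getD i [] with hridef
  have hwle : w ≤ ri.length := hrow i hi
  rcases lt_or_eq_of_le hwle with hlt | heq
  · -- longer row: it is settled (else D_ would hold), so both sides leave it unchanged
    have hset : pvCanSlideAux false ri = false := hsettled i hi hlt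
    have hBfix : PySem.Chars.join ['#'] ((PySem.Chars.splitOn ri ['#']).map fillSeg) = ri :=
      settled_row ri hset
    have hAfix : settleOut (ri.take w) = ri.take w := by
      rw [← B_row]
      exact settled_row _ (canSlide_take ri false w hset)
    rw [hAfix, List.take_append_drop, ← hgi, hBfix]
  · -- row exactly as wide as row 0: both sides compute settleOut of the whole row
    have htake : ri.take w = ri := List.take_of_length_le (by omega)
    have hdrop : ri.drop w = [] := List.drop_of_length_le (by omega)
    rw [htake, hdrop, List.append_nil, ← hgi, B_row]

theorem tilt_right_changed : Claim_changed_tilt_right := by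
  unfold Claim_changed_tilt_right
  decide
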